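-- pv_equiv track=rewrite | github.com/Akash-Sathish8/Arceo | arceo/arceo/parser.py | _split_by_service
-- ===== SOURCE A (Python) =====
-- KNOWN_SERVICES = {
--     "stripe", "gmail", "sendgrid", "ses", "mailgun", "aws", "gcp", "azure",
--     "slack", "salesforce", "zendesk", "hubspot", "github", "gitlab", "bitbucket",
--     "pagerduty", "twilio", "datadog", "jira", "linear", "notion", "airtable",
--     "shopify", "square", "paypal", "braintree", "docusign", "calendly",
--     "quickbooks", "bamboohr", "okta", "auth0", "clearbit", "segment",
--     "amplitude", "mixpanel", "snowflake", "bigquery", "redis", "mongo",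
--     "postgres", "mysql", "supabase", "vercel", "netlify", "heroku",
--     "cloudflare", "pinecone", "weaviate", "intercom", "freshdesk", "front",
--     "google", "microsoft", "oracle", "sap",
--     # Compound services
--     "aws_ec2", "aws_s3", "aws_rds", "aws_iam", "aws_ecs", "aws_ecr",
--     "aws_cloudtrail", "aws_lambda",
--     "google_workspace", "google_sheets", "google_drive", "google_calendar",
-- }
--
-- _STRIP_SUFFIXES = {"tool", "action", "function", "api", "client", "service", "handler"}
--
-- def _split_by_service(snake: str) -> tuple[str, str]:
--     """Split a snake_case string, checking for known service prefixes."""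
--     # Strip known suffixes
--     parts = snake.split("_")
--     while parts and parts[-1] in _STRIP_SUFFIXES:
--         parts.pop()
--     if not parts:
--         return "unknown", snake
--
--     snake = "_".join(parts)
--
--     # Try compound services first (aws_ec2, google_workspace)
--     for svc in sorted(KNOWN_SERVICES, key=len, reverse=True):
--         if snake.startswith(svc + "_") and len(snake) > len(svc) + 1:
--             action = snake[len(svc) + 1:]
--             return svc, action
--
--     # Single-word service
--     first = parts[0]
--     if first in KNOWN_SERVICES and len(parts) > 1:
--         return first, "_".join(parts[1:])
--
--     return "unknown", snake
-- ===== SOURCE B (Python) =====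
-- KNOWN_SERVICES = {
--     "stripe", "gmail", "sendgrid", "ses", "mailgun", "aws", "gcp", "azure",
--     "slack", "salesforce", "zendesk", "hubspot", "github", "gitlab", "bitbucket",
--     "pagerduty", "twilio", "datadog", "jira", "linear", "notion", "airtable",
--     "shopify", "square", "paypal", "braintree", "docusign", "calendly",
--     "quickbooks", "bamboohr", "okta", "auth0", "clearbit", "segment",
--     "amplitude", "mixpanel", "snowflake", "bigquery", "redis", "mongo",
--     "postgres", "mysql", "supabase", "vercel", "netlify", "heroku",
--     "cloudflare", "pinecone", "weaviate", "intercom", "freshdesk", "front",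
--     "google", "microsoft", "oracle", "sap",
--     # Compound services
--     "aws_ec2", "aws_s3", "aws_rds", "aws_iam", "aws_ecs", "aws_ecr",
--     "aws_cloudtrail", "aws_lambda",
--     "google_workspace", "google_sheets", "google_drive", "google_calendar",
-- }
--
-- _STRIP_SUFFIXES = {"tool", "action", "function", "api", "client", "service", "handler"}
--
-- def _split_by_service(snake: str) -> tuple[str, str]:
--     """Split a snake_case string, checking for known service prefixes."""
--     parts = snake.split("_")
--     while parts and parts[-1] in _STRIP_SUFFIXES:
--         parts.pop()
--     if not parts:
--         return "unknown", snake
--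
--     # Compound services are exactly two tokens: one direct lookup instead of
--     # sorting and scanning every service for the longest matching prefix.
--     if len(parts) >= 2:
--         compound = parts[0] + "_" + parts[1]
--         action = "_".join(parts[2:])
--         if compound in KNOWN_SERVICES and action:
--             return compound, action
--
--     if parts[0] in KNOWN_SERVICES and len(parts) > 1:
--         return parts[0], "_".join(parts[1:])
--
--     return "unknown", "_".join(parts)
-- ===== Notes on version B (the rewrite author's own statement) =====
-- stated objective: simpler
-- what changed: B replaces A's sort-all-services-by-length-and-scan-for-the-longest-matching-prefix loop with two direct membership lookups exploiting that compound services are exactly two underscore-separated tokens: look up the joined first two tokens (requiring a non-empty action), then the first token alone.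
import Mathlib
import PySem

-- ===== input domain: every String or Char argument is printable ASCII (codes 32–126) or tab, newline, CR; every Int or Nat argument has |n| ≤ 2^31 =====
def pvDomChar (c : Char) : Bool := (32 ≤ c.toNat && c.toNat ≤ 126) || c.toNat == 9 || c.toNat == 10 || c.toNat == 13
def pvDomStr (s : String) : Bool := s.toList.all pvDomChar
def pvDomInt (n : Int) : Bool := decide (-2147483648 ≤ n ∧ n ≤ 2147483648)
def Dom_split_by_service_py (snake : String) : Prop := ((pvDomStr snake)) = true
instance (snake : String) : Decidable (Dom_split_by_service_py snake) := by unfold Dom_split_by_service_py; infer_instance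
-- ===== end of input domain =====

-- B replaces A's sort-all-services-and-scan-for-the-longest-prefix loop with two direct
-- membership lookups (compound = first two tokens, then the first token): objective 'simpler'.

-- ===== PORT A =====
-- the KNOWN_SERVICES set, in source order (Python set membership; iteration order is
-- irrelevant to the result: at most one service of each length can match as a prefix)
def pvKnownServices : List String := ["stripe", "gmail", "sendgrid", "ses", "mailgun", "aws", "gcp", "azure",
  "slack", "salesforce", "zendesk", "hubspot", "github", "gitlab", "bitbucket",
  "pagerduty", "twilio", "datadog", "jira", "linear", "notion", "airtable",
  "shopify", "square", "paypal", "braintree", "docusign", "calendly",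
  "quickbooks", "bamboohr", "okta", "auth0", "clearbit", "segment",
  "amplitude", "mixpanel", "snowflake", "bigquery", "redis", "mongo",
  "postgres", "mysql", "supabase", "vercel", "netlify", "heroku",
  "cloudflare", "pinecone", "weaviate", "intercom", "freshdesk", "front",
  "google", "microsoft", "oracle", "sap",
  "aws_ec2", "aws_s3", "aws_rds", "aws_iam", "aws_ecs", "aws_ecr",
  "aws_cloudtrail", "aws_lambda",
  "google_workspace", "google_sheets", "google_drive", "google_calendar"]

def pvStripSuffixes : List String := ["tool", "action", "function", "api", "client", "service", "handler"]

-- `while parts and parts[-1] in _STRIP_SUFFIXES: parts.pop()`  (shared verbatim by A and B)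
def pvStripLoop : List String → List String
  | [] => []
  | p :: ps =>
    if pvStripSuffixes.contains ((p :: ps).getLast (by simp)) then pvStripLoop (p :: ps).dropLast
    else p :: ps
  termination_by parts => parts.length
  decreasing_by
    rw [List.length_dropLast]
    simp

-- `for svc in sorted(KNOWN_SERVICES, key=len, reverse=True): ...` with early return
def pvScan (snake : String) : List String → Option (String × String)
  | [] => none
  | svc :: tl =>
    if PySem.Str.startswith snake (svc ++ "_") && decide (PySem.Str.len snake > PySem.Str.len svc + 1) then
      some (svc, PySem.Str.slice snake (some (PySem.Str.len svc + 1)) none)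
    else pvScan snake tl

def split_by_service_py (snake : String) : String × String :=
  -- "_" is a non-empty separator, so split? never raises
  match pvStripLoop ((PySem.Str.split? snake "_").getD []) with
  | [] => ("unknown", snake)
  | first :: rest =>
    let snake1 := PySem.Str.join "_" (first :: rest)
    match pvScan snake1 (PySem.List.sorted pvKnownServices (fun s => PySem.Str.len s) true) with
    | some r => r
    | none =>
      if pvKnownServices.contains first && !rest.isEmpty then (first, PySem.Str.join "_" rest)
      else ("unknown", snake1)

-- ===== PORT B =====
def split_by_service_py_alt (snake : String) : String × String :=
  match pvStripLoop ((PySem.Str.split? snake "_").getD []) with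
  | [] => ("unknown", snake)
  | first :: rest =>
    let hit : Option (String × String) :=
      match rest with
      | second :: rest2 =>
        let compound := first ++ "_" ++ second
        let action := PySem.Str.join "_" rest2
        if pvKnownServices.contains compound && !(action == "") then some (compound, action) else none
      | [] => none
    match hit with
    | some r => r
    | none =>
      if pvKnownServices.contains first && !rest.isEmpty then (first, PySem.Str.join "_" rest)
      else ("unknown", PySem.Str.join "_" (first :: rest))

-- ===== PRECONDITION & SPEC =====
def Spec_split_by_service_py (snake : String) (out : String × String) : Prop := out = split_by_service_py_alt snake
instance (snake : String) (out : String × String) : Decidable (Spec_split_by_service_py snake out) := by unfold Spec_split_by_service_py; infer_instance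

-- ===== CLAIM (what is proved, stated in full; the proofs are below) =====
def Claim_equal_split_by_service_py : Prop := ∀ (snake : String), Dom_split_by_service_py snake → Spec_split_by_service_py snake (split_by_service_py snake)

-- ===== LEMMAS AND PROOFS =====

-- every service is one underscore-free token, or exactly two underscore-free tokens joined by an underscore
abbrev pvWf (s : String) : Prop :=
  ((('_' : Char) ∉ s.toList) ∨
    (s.toList = s.toList.takeWhile (· ≠ '_') ++ '_' :: (s.toList.dropWhile (· ≠ '_')).tail ∧
      ('_' : Char) ∉ s.toList.takeWhile (· ≠ '_') ∧
      ('_' : Char) ∉ (s.toList.dropWhile (· ≠ '_')).tail))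

-- a prefix containing a separator needs a separator in the string
theorem pvNotPref {x u w : List Char} (hw : ('_' : Char) ∉ w) : ¬ (x ++ '_' :: u <+: w) := by
  intro h
  exact hw (h.subset (by simp))

-- peeling one underscore-free token off both sides of a prefix relation at an underscore separator
theorem pvPeel {x p0 u v : List Char} (hx : ('_' : Char) ∉ x) (hp : ('_' : Char) ∉ p0) :
    x ++ '_' :: u <+: p0 ++ '_' :: v ↔ x = p0 ∧ u <+: v := by
  induction x generalizing p0 with
  | nil =>
    cases p0 with
    | nil => simp [List.cons_prefix_cons]
    | cons c p0' =>
      have hc : c ≠ '_' := by intro e; exact hp (by simp [e])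
      simp [List.cons_prefix_cons, hc.symm]
  | cons a x' ih =>
    have ha : a ≠ '_' := by intro e; exact hx (by simp [e])
    cases p0 with
    | nil => simp [List.cons_prefix_cons, ha]
    | cons b p0' =>
      have hx' : ('_' : Char) ∉ x' := fun m => hx (by simp [m])
      have hp' : ('_' : Char) ∉ p0' := fun m => hp (by simp [m])
      simp [List.cons_prefix_cons, ih hx' hp', and_assoc]

-- a startswith test with a trailing separator on a joined list pins down the first token
theorem pvPrefSingle {x p0 : List Char} {ps : List (List Char)}
    (hx : ('_' : Char) ∉ x) (hp : ('_' : Char) ∉ p0) :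
    x ++ '_' :: [] <+: PySem.Chars.join ['_'] (p0 :: ps) ↔ x = p0 ∧ ps ≠ [] := by
  cases ps with
  | nil =>
    simp [PySem.Chars.join_singleton]
    exact fun h => absurd h (pvNotPref hp)
  | cons q t =>
    rw [PySem.Chars.join_cons_cons]
    rw [show p0 ++ ['_'] ++ PySem.Chars.join ['_'] (q :: t) = p0 ++ '_' :: PySem.Chars.join ['_'] (q :: t) from by simp]
    rw [pvPeel hx hp]
    simp

-- elements produced by the underscore split contain no separator character
theorem pvGoFree : ∀ (fuel : Nat) (l cur : List Char) (acc : List (List Char)),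
    l.length < fuel → (∀ cs ∈ acc, ('_' : Char) ∉ cs) → ('_' : Char) ∉ cur →
    ∀ cs ∈ PySem.Chars.splitOn.go ['_'] fuel l cur acc, ('_' : Char) ∉ cs := by
  intro fuel
  induction fuel with
  | zero => intro l cur acc h; omega
  | succ n ih =>
    intro l cur acc hl hacc hcur
    cases l with
    | nil =>
      rw [PySem.Chars.splitOn.go]
      · intro cs hcs
        simp only [List.mem_reverse, List.mem_cons] at hcs
        rcases hcs with h | h
        · subst h; simpa using hcur
        · exact hacc cs h
      · omega
    | cons c restl =>
      rw [PySem.Chars.splitOn.go]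
      by_cases hpre : (['_'] : List Char).isPrefixOf (c :: restl) = true
      · rw [if_pos hpre]
        apply ih
        · simp at hl ⊢; omega
        · intro cs hcs
          rcases List.mem_cons.mp hcs with h | h
          · subst h; simpa using hcur
          · exact hacc cs h
        · simp
      · rw [if_neg hpre]
        have hc : c ≠ '_' := by
          intro e; subst e
          exact hpre (by simp [List.isPrefixOf])
        apply ih
        · simp at hl ⊢; omega
        · exact hacc
        · intro m
          rcases List.mem_cons.mp m with h | h
          · exact hc h.symm
          · exact hcur h

theorem pvSplitFree (snake : String) :
    ∀ p ∈ (PySem.Str.split? snake "_").getD [], ('_' : Char) ∉ p.toList := by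
  intro p hp
  have : p ∈ (PySem.Chars.splitOn snake.toList ['_']).map String.ofList := by
    simpa [PySem.Str.split?, PySem.Chars.split?] using hp
  rcases List.mem_map.mp this with ⟨cs, hcs, rfl⟩
  have hfree := pvGoFree (snake.toList.length + 1) snake.toList [] [] (by omega)
    (by intro cs h; cases h) (by simp) cs (by simpa [PySem.Chars.splitOn] using hcs)
  simpa using hfree

-- the suffix-stripping loop only removes elements
theorem pvStripLoop_subset (parts : List String) : ∀ p ∈ pvStripLoop parts, p ∈ parts := by
  induction parts using pvStripLoop.induct with
  | case1 => simp [pvStripLoop]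
  | case2 p ps hc ih =>
    rw [pvStripLoop, if_pos hc]
    exact fun q hq => List.dropLast_subset _ (ih q hq)
  | case3 p ps hc =>
    rw [pvStripLoop, if_neg hc]
    exact fun q hq => hq

theorem pvToListJoin (xs : List String) :
    (PySem.Str.join "_" xs).toList = PySem.Chars.join ['_'] (xs.map String.toList) := by
  rw [PySem.Str.toList_join, show ("_" : String).toList = ['_'] from rfl]

theorem pvJoinNe (xs : List String) :
    PySem.Str.join "_" xs ≠ "" ↔ PySem.Chars.join ['_'] (xs.map String.toList) ≠ [] := by
  rw [← pvToListJoin]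
  constructor
  · intro h he
    exact h (String.toList_inj.mp (by rw [he]; rfl))
  · intro h he
    exact h (by rw [he]; rfl)

theorem pvCondIff {S svc : String} :
    (PySem.Str.startswith S (svc ++ "_") && decide (PySem.Str.len S > PySem.Str.len svc + 1)) = true ↔
      (svc.toList ++ '_' :: [] <+: S.toList ∧ svc.toList.length + 1 < S.toList.length) := by
  rw [Bool.and_eq_true, PySem.Str.startswith_eq, PySem.Str.len_eq, PySem.Str.len_eq]
  rw [show (svc ++ "_").toList = svc.toList ++ '_' :: [] from by rw [String.toList_append]; rfl]
  rw [PySem.Chars.startswith_iff]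
  constructor
  · rintro ⟨h1, h2⟩
    refine ⟨h1, ?_⟩
    have := of_decide_eq_true h2
    omega
  · rintro ⟨h1, h2⟩
    refine ⟨h1, decide_eq_true ?_⟩
    omega

-- the loop condition of A's scan, as a function of the parts
theorem pvCond_true_cases {first svc : String} {rest : List String}
    (hwf : pvWf svc) (hf : ('_' : Char) ∉ first.toList) (hr : ∀ p ∈ rest, ('_' : Char) ∉ p.toList)
    (hc : (PySem.Str.startswith (PySem.Str.join "_" (first :: rest)) (svc ++ "_") &&
      decide (PySem.Str.len (PySem.Str.join "_" (first :: rest)) > PySem.Str.len svc + 1)) = true) :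
    (svc = first ∧ PySem.Str.join "_" rest ≠ "") ∨
    (∃ second rest2, rest = second :: rest2 ∧ svc = first ++ "_" ++ second ∧ PySem.Str.join "_" rest2 ≠ "") := by
  rw [pvCondIff, pvToListJoin] at hc
  simp only [List.map_cons] at hc
  rcases hc with ⟨hpre, hlen⟩
  rcases hwf with hs | ⟨hdec, hx, hy⟩
  · -- svc is a single underscore-free token
    left
    have h1 := (pvPrefSingle hs hf).mp hpre
    rcases h1 with ⟨hEq, hne⟩
    cases rest with
    | nil => simp at hne
    | cons q t =>
      refine ⟨String.toList_inj.mp hEq, ?_⟩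
      rw [pvJoinNe]
      simp only [List.map_cons] at hlen ⊢
      intro hnil
      rw [PySem.Chars.join_cons_cons, hnil, hEq] at hlen
      simp at hlen
  · -- svc = x ++ "_" ++ y with x, y underscore-free
    right
    set x := svc.toList.takeWhile (· ≠ '_') with hxdef
    set y := (svc.toList.dropWhile (· ≠ '_')).tail with hydef
    rw [hdec] at hpre hlen
    rw [show (x ++ '_' :: y) ++ '_' :: [] = x ++ '_' :: (y ++ '_' :: []) from by simp] at hpre
    cases rest with
    | nil =>
      simp only [List.map_nil] at hpre
      rw [PySem.Chars.join_singleton] at hpre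
      exact absurd hpre (pvNotPref hf)
    | cons second rest2 =>
      simp only [List.map_cons] at hpre hlen
      rw [PySem.Chars.join_cons_cons,
        show first.toList ++ ['_'] ++ PySem.Chars.join ['_'] (second.toList :: rest2.map String.toList)
          = first.toList ++ '_' :: PySem.Chars.join ['_'] (second.toList :: rest2.map String.toList) from by simp] at hpre hlen
      rw [pvPeel hx hf] at hpre
      rcases hpre with ⟨hxf, hpre2⟩
      have hsec : ('_' : Char) ∉ second.toList := hr second (by simp)
      have h2 := (pvPrefSingle hy hsec).mp hpre2
      rcases h2 with ⟨hys, hne2⟩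
      cases rest2 with
      | nil => simp at hne2
      | cons q t =>
        refine ⟨second, q :: t, rfl, ?_, ?_⟩
        · apply String.toList_inj.mp
          rw [String.toList_append, String.toList_append, hdec, hxf, hys]
          simp
        · rw [pvJoinNe]
          simp only [List.map_cons] at hlen ⊢
          intro hnil
          rw [PySem.Chars.join_cons_cons, hnil, hxf, hys] at hlen
          simp at hlen
          omega

theorem pvCond_single_true {first : String} {rest : List String}
    (hf : ('_' : Char) ∉ first.toList) (hr : ∀ p ∈ rest, ('_' : Char) ∉ p.toList)
    (hj : PySem.Str.join "_" rest ≠ "") :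
    (PySem.Str.startswith (PySem.Str.join "_" (first :: rest)) (first ++ "_") &&
      decide (PySem.Str.len (PySem.Str.join "_" (first :: rest)) > PySem.Str.len first + 1)) = true := by
  cases rest with
  | nil => exact absurd (String.toList_inj.mp (by rw [pvToListJoin]; rfl)) hj
  | cons q t =>
    rw [pvCondIff, pvToListJoin]
    simp only [List.map_cons]
    rw [PySem.Chars.join_cons_cons,
      show first.toList ++ ['_'] ++ PySem.Chars.join ['_'] (q.toList :: t.map String.toList)
        = first.toList ++ '_' :: PySem.Chars.join ['_'] (q.toList :: t.map String.toList) from by simp]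
    have hne : PySem.Chars.join ['_'] (q.toList :: t.map String.toList) ≠ [] := by
      have := (pvJoinNe (q :: t)).mp hj
      simpa using this
    constructor
    · rw [pvPeel hf hf]
      exact ⟨rfl, List.nil_prefix⟩
    · have := List.length_pos_of_ne_nil hne
      simp
      omega

theorem pvCond_compound_true {first second : String} {rest2 : List String}
    (hf : ('_' : Char) ∉ first.toList) (hs : ('_' : Char) ∉ second.toList)
    (hr : ∀ p ∈ rest2, ('_' : Char) ∉ p.toList)
    (hj : PySem.Str.join "_" rest2 ≠ "") :
    (PySem.Str.startswith (PySem.Str.join "_" (first :: second :: rest2)) ((first ++ "_" ++ second) ++ "_") &&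
      decide (PySem.Str.len (PySem.Str.join "_" (first :: second :: rest2)) > PySem.Str.len (first ++ "_" ++ second) + 1)) = true := by
  cases rest2 with
  | nil => exact absurd (String.toList_inj.mp (by rw [pvToListJoin]; rfl)) hj
  | cons q t =>
    rw [pvCondIff, pvToListJoin]
    simp only [List.map_cons, String.toList_append]
    rw [show ("_" : String).toList = ['_'] from rfl]
    rw [PySem.Chars.join_cons_cons, PySem.Chars.join_cons_cons]
    have hne : PySem.Chars.join ['_'] (q.toList :: t.map String.toList) ≠ [] := by
      have := (pvJoinNe (q :: t)).mp hj
      simpa using this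
    have hlen := List.length_pos_of_ne_nil hne
    constructor
    · rw [show first.toList ++ ['_'] ++ second.toList ++ '_' :: []
          = first.toList ++ '_' :: (second.toList ++ '_' :: []) from by simp,
        show first.toList ++ ['_'] ++ (second.toList ++ ['_'] ++ PySem.Chars.join ['_'] (q.toList :: t.map String.toList))
          = first.toList ++ '_' :: (second.toList ++ '_' :: PySem.Chars.join ['_'] (q.toList :: t.map String.toList)) from by simp]
      rw [pvPeel hf hf, pvPeel hs hs]
      exact ⟨rfl, rfl, List.nil_prefix⟩
    · simp
      omega

-- the slice A returns after a single-token match is "_".join(rest)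
theorem pvSlice_single {first : String} {rest : List String} :
    PySem.Str.slice (PySem.Str.join "_" (first :: rest)) (some (PySem.Str.len first + 1)) none =
      PySem.Str.join "_" rest := by
  apply String.toList_inj.mp
  rw [PySem.Str.toList_slice, PySem.Chars.slice_eq_listSlice, PySem.Str.toList_join,
    PySem.Str.toList_join, PySem.Str.len_eq]
  rw [show ((first.toList.length : Int) + 1) = ((first.toList.length + 1 : Nat) : Int) from by push_cast; ring,
    PySem.List.slice_from_natCast]
  simp only [List.map_cons]
  cases rest with
  | nil => simp [PySem.Chars.join_singleton, PySem.Chars.join_nil]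
  | cons q t =>
    simp only [List.map_cons]
    rw [show ("_" : String).toList = ['_'] from rfl, PySem.Chars.join_cons_cons]
    rw [show first.toList ++ ['_'] ++ PySem.Chars.join ['_'] (q.toList :: t.map String.toList)
        = (first.toList ++ ['_']) ++ PySem.Chars.join ['_'] (q.toList :: t.map String.toList) from by simp]
    rw [show first.toList.length + 1 = (first.toList ++ ['_']).length from by simp]
    rw [List.drop_left]

-- the slice A returns after a compound match is "_".join(rest2)
theorem pvSlice_compound {first second : String} {rest2 : List String} :
    PySem.Str.slice (PySem.Str.join "_" (first :: second :: rest2)) (some (PySem.Str.len (first ++ "_" ++ second) + 1)) none =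
      PySem.Str.join "_" rest2 := by
  apply String.toList_inj.mp
  rw [PySem.Str.toList_slice, PySem.Chars.slice_eq_listSlice, PySem.Str.toList_join,
    PySem.Str.toList_join, PySem.Str.len_eq]
  rw [show (((first ++ "_" ++ second).toList.length : Int) + 1) = (((first ++ "_" ++ second).toList.length + 1 : Nat) : Int) from by push_cast; ring,
    PySem.List.slice_from_natCast]
  simp only [List.map_cons, String.toList_append]
  rw [show ("_" : String).toList = ['_'] from rfl, PySem.Chars.join_cons_cons]
  cases rest2 with
  | nil =>
    simp only [List.map_nil]
    rw [PySem.Chars.join_singleton, PySem.Chars.join_nil]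
    apply List.drop_eq_nil_of_le
    simp
  | cons q t =>
    simp only [List.map_cons]
    rw [PySem.Chars.join_cons_cons]
    rw [show (first.toList ++ ['_'] ++ second.toList).length + 1 = (first.toList ++ ['_'] ++ second.toList ++ ['_']).length from by simp; omega]
    rw [show first.toList ++ ['_'] ++ (second.toList ++ ['_'] ++ PySem.Chars.join ['_'] (q.toList :: List.map String.toList t))
        = (first.toList ++ ['_'] ++ second.toList ++ ['_']) ++ PySem.Chars.join ['_'] (q.toList :: List.map String.toList t) from by simp]
    rw [List.drop_left]

theorem pvScan_none {S : String} {L : List String}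
    (h : ∀ svc ∈ L, (PySem.Str.startswith S (svc ++ "_") &&
      decide (PySem.Str.len S > PySem.Str.len svc + 1)) = false) :
    pvScan S L = none := by
  induction L with
  | nil => rfl
  | cons a tl ih =>
    rw [pvScan, if_neg]
    · exact ih (fun svc m => h svc (by simp [m]))
    · rw [Bool.not_eq_true]; exact h a (by simp)

theorem pvScan_hit {S tgt : String} {L : List String}
    (HP : L.Pairwise (fun a b => PySem.Str.len b ≤ PySem.Str.len a))
    (htgt : tgt ∈ L)
    (hc : (PySem.Str.startswith S (tgt ++ "_") && decide (PySem.Str.len S > PySem.Str.len tgt + 1)) = true)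
    (hother : ∀ s ∈ L, (PySem.Str.startswith S (s ++ "_") &&
      decide (PySem.Str.len S > PySem.Str.len s + 1)) = true → s = tgt ∨ PySem.Str.len s < PySem.Str.len tgt) :
    pvScan S L = some (tgt, PySem.Str.slice S (some (PySem.Str.len tgt + 1)) none) := by
  induction L with
  | nil => cases htgt
  | cons a tl ih =>
    by_cases ha : a = tgt
    · subst ha
      rw [pvScan, if_pos hc]
    · have htgt' : tgt ∈ tl := by
        cases htgt with
        | head => exact absurd rfl ha
        | tail _ m => exact m
      have hfa : (PySem.Str.startswith S (a ++ "_") && decide (PySem.Str.len S > PySem.Str.len a + 1)) = false := by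
        by_contra hne
        have := hother a (by simp) (by revert hne; cases (PySem.Str.startswith S (a ++ "_") && decide (PySem.Str.len S > PySem.Str.len a + 1)) <;> simp)
        rcases this with h1 | h2
        · exact ha h1
        · have hle : PySem.Str.len tgt ≤ PySem.Str.len a := (List.pairwise_cons.mp HP).1 tgt htgt'
          omega
      rw [pvScan, if_neg (by rw [Bool.not_eq_true]; exact hfa)]
      exact ih (List.pairwise_cons.mp HP).2 htgt' (fun s m hs => hother s (by simp [m]) hs)

theorem pvKnown_wf : ∀ s ∈ pvKnownServices, pvWf s := by
  decide

theorem pvLenLt (first second : String) :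
    PySem.Str.len first < PySem.Str.len (first ++ "_" ++ second) := by
  rw [PySem.Str.len_eq, PySem.Str.len_eq, String.toList_append, String.toList_append]
  simp

theorem pvJoinCons_ne_nil_tail {second : String} {rest2 : List String}
    (h : PySem.Str.join "_" (second :: rest2) = "") : PySem.Str.join "_" rest2 = "" := by
  cases rest2 with
  | nil => rfl
  | cons q t =>
    exfalso
    have hl : (PySem.Str.join "_" (second :: q :: t)).toList = [] := by rw [h]; rfl
    rw [pvToListJoin] at hl
    simp only [List.map_cons] at hl
    rw [PySem.Chars.join_cons_cons] at hl
    simp at hl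

-- ===== VERDICT (by name: the statement is the Claim_ definition above) =====
theorem split_by_service_py_spec : Claim_equal_split_by_service_py := by
  intro snake _
  unfold Spec_split_by_service_py split_by_service_py split_by_service_py_alt
  have hfree : ∀ p ∈ pvStripLoop ((PySem.Str.split? snake "_").getD []), ('_' : Char) ∉ p.toList :=
    fun p hp => pvSplitFree snake p (pvStripLoop_subset _ p hp)
  cases hst : pvStripLoop ((PySem.Str.split? snake "_").getD []) with
  | nil => rfl
  | cons first rest =>
    rw [hst] at hfree
    have hf : ('_' : Char) ∉ first.toList := hfree first (by simp)
    have hr : ∀ p ∈ rest, ('_' : Char) ∉ p.toList := fun p hp => hfree p (by simp [hp])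
    have hmem : ∀ s : String, s ∈ PySem.List.sorted pvKnownServices (fun s => PySem.Str.len s) true ↔ s ∈ pvKnownServices :=
      fun s => (PySem.List.sorted_perm pvKnownServices (fun s => PySem.Str.len s) true).mem_iff
    have HP := PySem.List.sorted_pairwise_rev pvKnownServices (fun s => PySem.Str.len s)
    have HW : ∀ s ∈ PySem.List.sorted pvKnownServices (fun s => PySem.Str.len s) true, pvWf s :=
      fun s hs => pvKnown_wf s ((hmem s).mp hs)
    cases rest with
    | nil =>
      have hscan : pvScan (PySem.Str.join "_" [first]) (PySem.List.sorted pvKnownServices (fun s => PySem.Str.len s) true) = none := by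
        apply pvScan_none
        intro svc hsvc
        cases hcond : (PySem.Str.startswith (PySem.Str.join "_" [first]) (svc ++ "_") &&
            decide (PySem.Str.len (PySem.Str.join "_" [first]) > PySem.Str.len svc + 1)) with
        | false => rfl
        | true =>
          exfalso
          rcases pvCond_true_cases (HW svc hsvc) hf (by simp) hcond with ⟨-, h2⟩ | ⟨s2, r2, heq, -, -⟩
          · exact h2 rfl
          · cases heq
      simp only [hscan]
    | cons second rest2 =>
      have hsec : ('_' : Char) ∉ second.toList := hr second (by simp)
      have hr2 : ∀ p ∈ rest2, ('_' : Char) ∉ p.toList := fun p hp => hr p (by simp [hp])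
      by_cases hC : (first ++ "_" ++ second) ∈ pvKnownServices ∧ PySem.Str.join "_" rest2 ≠ ""
      · -- compound hit: A's scan finds it first, B's lookup finds it directly
        have hscan := pvScan_hit HP ((hmem _).mpr hC.1)
          (pvCond_compound_true hf hsec hr2 hC.2)
          (by
            intro s hs hcond
            rcases pvCond_true_cases (HW s hs) hf hr hcond with ⟨h1, -⟩ | ⟨s2, r2, heq, h1, -⟩
            · right; rw [h1]; exact pvLenLt first second
            · obtain ⟨rfl, rfl⟩ : s2 = second ∧ r2 = rest2 := by
                injection heq with e1 e2; exact ⟨e1.symm, e2.symm⟩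
              left; exact h1)
        simp only [hscan, pvSlice_compound]
        rw [if_pos (by
          rw [Bool.and_eq_true, List.contains_iff_mem]
          exact ⟨hC.1, by simp [beq_false_of_ne hC.2]⟩)]
      · -- no compound hit
        have hBnone : (if pvKnownServices.contains (first ++ "_" ++ second) && !(PySem.Str.join "_" rest2 == "") then
            some (first ++ "_" ++ second, PySem.Str.join "_" rest2) else none) = (none : Option (String × String)) := by
          rw [if_neg]
          intro hcb
          rw [Bool.and_eq_true, List.contains_iff_mem] at hcb
          exact hC ⟨hcb.1, by simpa using hcb.2⟩
        by_cases hS : first ∈ pvKnownServices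
        · by_cases hJ : PySem.Str.join "_" (second :: rest2) = ""
          · -- degenerate: the joined action is empty, the scan misses, both fall through
            have hscan : pvScan (PySem.Str.join "_" (first :: second :: rest2)) (PySem.List.sorted pvKnownServices (fun s => PySem.Str.len s) true) = none := by
              apply pvScan_none
              intro svc hsvc
              cases hcond : (PySem.Str.startswith (PySem.Str.join "_" (first :: second :: rest2)) (svc ++ "_") &&
                  decide (PySem.Str.len (PySem.Str.join "_" (first :: second :: rest2)) > PySem.Str.len svc + 1)) with
              | false => rfl
              | true =>
                exfalso
                rcases pvCond_true_cases (HW svc hsvc) hf hr hcond with ⟨-, h2⟩ | ⟨s2, r2, heq, -, h2⟩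
                · exact h2 hJ
                · obtain ⟨rfl, rfl⟩ : s2 = second ∧ r2 = rest2 := by
                    injection heq with e1 e2; exact ⟨e1.symm, e2.symm⟩
                  exact h2 (pvJoinCons_ne_nil_tail hJ)
            simp only [hscan, hBnone]
          · -- single-service hit in the scan = B's first-token lookup
            have hscan := pvScan_hit HP ((hmem _).mpr hS)
              (pvCond_single_true hf hr hJ)
              (by
                intro s hs hcond
                rcases pvCond_true_cases (HW s hs) hf hr hcond with ⟨h1, -⟩ | ⟨s2, r2, heq, h1, h2⟩
                · left; exact h1
                · exfalso
                  obtain ⟨rfl, rfl⟩ : s2 = second ∧ r2 = rest2 := by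
                    injection heq with e1 e2; exact ⟨e1.symm, e2.symm⟩
                  exact hC ⟨by rw [← h1]; exact (hmem s).mp hs, h2⟩)
            simp only [hscan, pvSlice_single, hBnone]
            rw [if_pos (by rw [Bool.and_eq_true, List.contains_iff_mem]; exact ⟨hS, by simp⟩)]
        · -- unknown service: the scan misses and both fall back
          have hscan : pvScan (PySem.Str.join "_" (first :: second :: rest2)) (PySem.List.sorted pvKnownServices (fun s => PySem.Str.len s) true) = none := by
            apply pvScan_none
            intro svc hsvc
            cases hcond : (PySem.Str.startswith (PySem.Str.join "_" (first :: second :: rest2)) (svc ++ "_") &&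
                decide (PySem.Str.len (PySem.Str.join "_" (first :: second :: rest2)) > PySem.Str.len svc + 1)) with
            | false => rfl
            | true =>
              exfalso
              rcases pvCond_true_cases (HW svc hsvc) hf hr hcond with ⟨h1, -⟩ | ⟨s2, r2, heq, h1, h2⟩
              · exact hS (by rw [← h1]; exact (hmem svc).mp hsvc)
              · obtain ⟨rfl, rfl⟩ : s2 = second ∧ r2 = rest2 := by
                  injection heq with e1 e2; exact ⟨e1.symm, e2.symm⟩
                exact hC ⟨by rw [← h1]; exact (hmem svc).mp hsvc, h2⟩
          simp only [hscan, hBnone]
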